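-- pv_equiv track=rewrite | github.com/pengjichengbest/Algorithm | new_problem.py | canSeePersonsCount
-- ===== SOURCE A (Python) =====
-- def canSeePersonsCount(heights):
--     ans = [0] * len(heights)
--     n = len(heights)
--     stack = []
--     record_right_higher = [-1] * n
--     for i in range(n):
--         while stack and heights[stack[-1]] <= heights[i]:
--             record_right_higher[stack[-1]] = i
--             stack.pop()
--         stack.append(i)
--     record_increase = [1] * n
--     for i in range(n - 2, -1, -1):
--         right_index = record_right_higher[i]
--         if right_index > 0 and heights[record_right_higher[i]] > heights[i]:
--             record_increase[i] = record_increase[record_right_higher[i]] + 1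
--     for i in range(n - 1):
--         right_index = record_right_higher[i]
--         ans[i] = record_increase[i + 1] - record_increase[right_index] + 1
--     return ans
-- ===== SOURCE B (Python) =====
-- def canSeePersonsCount(heights):
--     ans = []
--     stack = []
--     for x in reversed(heights):
--         c = 0
--         while stack and stack[-1] < x:
--             stack.pop()
--             c += 1
--         if stack:
--             c += 1
--         ans.append(c)
--         stack.append(x)
--     ans.reverse()
--     return ans
-- ===== Notes on version B (the rewrite author's own statement) =====
-- stated objective: simpler
-- what changed: Replaced A's three index-based passes (a left-to-right next-greater-or-equal stack filling a pointer array, a right-to-left chain-length table, and a final arithmetic pass that relies on negative-index wraparound) by the standard single right-to-left monotonic stack over the height values themselves; Pre_ excludes lists with repeated heights, where the two tie-handling behaviours are both accidental (the original problem guarantees distinct heights) and may differ.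
-- outside the precondition, e.g. on canSeePersonsCount([2, 5, 3, 2, 2]): A returns [1, 1, 1, 1, 0], B returns [1, 1, 2, 1, 0]
import Mathlib
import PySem

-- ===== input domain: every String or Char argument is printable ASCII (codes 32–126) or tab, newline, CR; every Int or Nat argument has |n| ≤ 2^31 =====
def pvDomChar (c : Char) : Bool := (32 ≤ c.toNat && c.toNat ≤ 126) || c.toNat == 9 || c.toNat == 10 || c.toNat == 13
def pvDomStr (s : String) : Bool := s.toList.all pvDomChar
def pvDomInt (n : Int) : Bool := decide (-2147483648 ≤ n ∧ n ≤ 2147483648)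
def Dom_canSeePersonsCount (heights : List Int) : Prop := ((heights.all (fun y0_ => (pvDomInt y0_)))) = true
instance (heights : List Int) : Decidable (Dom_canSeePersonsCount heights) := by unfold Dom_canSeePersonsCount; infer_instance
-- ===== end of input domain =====

-- B replaces A's three index-based passes (left-to-right next-greater-or-equal stack + chain-length
-- table + arithmetic pass relying on negative-index wraparound) by the standard single right-to-left
-- monotonic stack over the height values (objective: simpler).

-- ===== PORT A =====
-- inner while loop of A's first pass: pop while heights[stack[-1]] <= heights[i], recording i
def pvPop1 (h : List Int) (i : Int) : List Int → List Int → List Int × List Int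
  | [], rrh => ([], rrh)
  | top :: rest, rrh =>
      if PySem.List.pyGetD h top 0 ≤ PySem.List.pyGetD h i 0 then
        pvPop1 h i rest (PySem.List.pySetD rrh top i)
      else (top :: rest, rrh)

-- body of A's first loop (stack of indices stored top-first)
def pvStep1 (h : List Int) (p : List Int × List Int) (i : Int) : List Int × List Int :=
  let q := pvPop1 h i p.1 p.2
  (i :: q.1, q.2)

-- body of A's second loop
def pvStep2 (h rrh ri : List Int) (i : Int) : List Int :=
  let r := PySem.List.pyGetD rrh i 0
  if 0 < r ∧ PySem.List.pyGetD h r 0 > PySem.List.pyGetD h i 0 then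
    PySem.List.pySetD ri i (PySem.List.pyGetD ri r 0 + 1)
  else ri

-- body of A's third loop (record_increase[right_index] with right_index = -1 wraps to the last entry)
def pvStep3 (rrh ri ans : List Int) (i : Int) : List Int :=
  let r := PySem.List.pyGetD rrh i 0
  PySem.List.pySetD ans i
    (PySem.List.pyGetD ri (i + 1) 0 - PySem.List.pyGetD ri r 0 + 1)

def canSeePersonsCount (heights : List Int) : List Int :=
  let n : Int := (heights.length : Int)
  let st := (PySem.List.pyRange 0 n 1).foldl (pvStep1 heights)
      ([], List.replicate heights.length (-1))
  let ri := (PySem.List.pyRange (n - 2) (-1) (-1)).foldl (pvStep2 heights st.2)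
      (List.replicate heights.length 1)
  (PySem.List.pyRange 0 (n - 1) 1).foldl (pvStep3 st.2 ri)
      (List.replicate heights.length 0)

-- ===== PORT B =====
-- inner while loop of B: pop while stack[-1] < x, counting pops (stack stored top-first)
def pvPop2 (x : Int) : List Int → Int → List Int × Int
  | [], c => ([], c)
  | t :: rest, c => if t < x then pvPop2 x rest (c + 1) else (t :: rest, c)

-- body of B's single loop: state = (stack, ans so far)
def pvStepB (p : List Int × List Int) (x : Int) : List Int × List Int :=
  let q := pvPop2 x p.1 0
  let c := if q.1 ≠ [] then q.2 + 1 else q.2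
  (x :: q.1, p.2 ++ [c])

def canSeePersonsCount_alt (heights : List Int) : List Int :=
  (heights.reverse.foldl pvStepB ([], [])).2.reverse

-- ===== PRECONDITION & SPEC =====
-- Pre_ excludes lists with repeated heights: the original problem guarantees distinct heights,
-- and on ties A's and B's visibility counts are both accidental and may differ.
def Pre_canSeePersonsCount (heights : List Int) : Prop := heights.Nodup
instance (heights : List Int) : Decidable (Pre_canSeePersonsCount heights) := by unfold Pre_canSeePersonsCount; infer_instance
def pvWitness_canSeePersonsCount : List Int := [2, 1, 3]

def Spec_canSeePersonsCount (heights : List Int) (out : List Int) : Prop := out = canSeePersonsCount_alt heights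
instance (heights : List Int) (out : List Int) : Decidable (Spec_canSeePersonsCount heights out) := by unfold Spec_canSeePersonsCount; infer_instance

-- ===== CLAIM (what is proved, stated in full; the proofs are below) =====
def Claim_equal_canSeePersonsCount : Prop := ∀ (heights : List Int), Dom_canSeePersonsCount heights → Pre_canSeePersonsCount heights → Spec_canSeePersonsCount heights (canSeePersonsCount heights)

-- ===== LEMMAS AND PROOFS =====

-- the increasing "skyline" of a list: its head, then the skyline records strictly above it
def pvRecords : List Int → List Int
  | [] => []
  | x :: t => x :: (pvRecords t).dropWhile (· < x)

-- persons of height x facing a queue with skyline rs: all records below x, plus the first blocker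
def pvCnt (x : Int) (rs : List Int) : Int :=
  ((rs.takeWhile (· < x)).length : Int) + (if rs.dropWhile (· < x) = [] then 0 else 1)

-- the common specification of both programs
def pvSpec : List Int → List Int
  | [] => []
  | x :: t => pvCnt x (pvRecords t) :: pvSpec t

-- the value A's second pass stores at j, and the value its third pass stores at j
def pvRiSpec (h : List Int) (j : Nat) : Int := ((pvRecords (h.drop j)).length : Int)
def pvAnsSpec (h : List Int) (j : Nat) : Int := pvCnt (h.getD j 0) (pvRecords (h.drop (j + 1)))

-- first index j with i < j < m and h[j] >= h[i], else -1 (what record_right_higher[i] holds)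
def pvNgeB (h : List Int) (i m : Nat) : Int :=
  ((List.range' (i+1) (m - (i+1))).find?
    (fun j => decide (h.getD i 0 ≤ h.getD j 0))).elim (-1) (fun j => (j : Int))

-- invariant of A's first loop after processing indices < k
def pvInv1 (h : List Int) (k : Nat) (p : List Int × List Int) : Prop :=
  (∀ j ∈ p.1, ∃ jn : Nat, j = (jn : Int) ∧ jn < k ∧ pvNgeB h jn k = -1) ∧
  (∀ jn : Nat, jn < k → pvNgeB h jn k = -1 → (jn : Int) ∈ p.1) ∧
  p.1.Pairwise (· > ·) ∧
  p.2.length = h.length ∧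
  (∀ jn : Nat, jn < h.length → PySem.List.pyGetD p.2 (jn : Int) 0 = pvNgeB h jn k)

----------------------------------------------------------------------
-- generic list lemmas
----------------------------------------------------------------------

theorem pv_dropWhile_dropWhile (z x : Int) (hzx : z ≤ x) (l : List Int) :
    (l.dropWhile (· < z)).dropWhile (· < x) = l.dropWhile (· < x) := by
  induction l with
  | nil => simp
  | cons y t ih =>
    by_cases hyz : y < z
    · have hyx : y < x := lt_of_lt_of_le hyz hzx
      simp [List.dropWhile_cons, hyz, hyx, ih]
    · simp [List.dropWhile_cons, hyz]

theorem pv_len_take_drop (p : Int → Bool) (l : List Int) :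
    l.length = (l.takeWhile p).length + (l.dropWhile p).length := by
  have h1 := congrArg List.length (List.takeWhile_append_dropWhile (p := p) (l := l))
  rw [List.length_append] at h1
  omega

----------------------------------------------------------------------
-- pvNgeB characterisation
----------------------------------------------------------------------

theorem pvNgeB_trivial (h : List Int) (i m : Nat) (hm : m ≤ i + 1) : pvNgeB h i m = -1 := by
  unfold pvNgeB
  rw [Nat.sub_eq_zero_of_le hm]
  rfl

theorem pvNgeB_neg_iff (h : List Int) (i m : Nat) :
    pvNgeB h i m = -1 ↔ ∀ j, i < j → j < m → h.getD j 0 < h.getD i 0 := by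
  unfold pvNgeB
  cases hf : (List.range' (i+1) (m - (i+1))).find? (fun j => decide (h.getD i 0 ≤ h.getD j 0)) with
  | none =>
    simp only [Option.elim]
    constructor
    · intro _ j hij hjm
      have hmem : j ∈ List.range' (i+1) (m - (i+1)) := by
        rw [List.mem_range'_1]; omega
      have := List.find?_eq_none.mp hf j hmem
      simpa using this
    · intro _; trivial
  | some j =>
    simp only [Option.elim]
    have hple := List.find?_some hf
    have hmem := List.mem_of_find?_eq_some hf
    rw [List.mem_range'_1] at hmem
    simp only [decide_eq_true_eq] at hple
    constructor
    · intro hc; exfalso; omega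
    · intro hall
      exfalso
      exact absurd hple (not_le.mpr (hall j (by omega) (by omega)))

theorem pv_range_split (i jj m : Nat) (h1 : i < jj) (h2 : jj ≤ m) :
    List.range' (i+1) (m - (i+1)) =
      List.range' (i+1) (jj - (i+1)) ++ List.range' jj (m - jj) := by
  have h3 : i + 1 + (jj - (i+1)) = jj := by omega
  calc List.range' (i+1) (m - (i+1))
      = List.range' (i+1) ((jj - (i+1)) + (m - jj)) := by congr 1; omega
    _ = List.range' (i+1) (jj - (i+1)) ++ List.range' (i+1+(jj-(i+1))) (m - jj) := by
        rw [List.range'_append_1]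
    _ = List.range' (i+1) (jj - (i+1)) ++ List.range' jj (m - jj) := by rw [h3]

theorem pvNgeB_eq_coe_iff (h : List Int) (i m jj : Nat) :
    pvNgeB h i m = (jj : Int) ↔
      i < jj ∧ jj < m ∧ h.getD i 0 ≤ h.getD jj 0 ∧
      ∀ j, i < j → j < jj → h.getD j 0 < h.getD i 0 := by
  constructor
  · intro hr
    unfold pvNgeB at hr
    cases hf : (List.range' (i+1) (m - (i+1))).find? (fun j => decide (h.getD i 0 ≤ h.getD j 0)) with
    | none =>
      rw [hf] at hr
      simp only [Option.elim] at hr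
      exfalso; omega
    | some j =>
      rw [hf] at hr
      simp only [Option.elim, Nat.cast_inj] at hr
      subst hr
      have hmem := List.mem_of_find?_eq_some hf
      rw [List.mem_range'_1] at hmem
      have hp := List.find?_some hf
      simp only [decide_eq_true_eq] at hp
      refine ⟨by omega, by omega, hp, ?_⟩
      intro j2 hij2 hj2j
      rw [pv_range_split i j m (by omega) (by omega), List.find?_append] at hf
      cases hpre : (List.range' (i+1) (j - (i+1))).find?
          (fun j => decide (h.getD i 0 ≤ h.getD j 0)) with
      | some j' =>
        exfalso
        rw [hpre] at hf
        rw [Option.some_or] at hf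
        simp only [Option.some.injEq] at hf
        have hmem' := List.mem_of_find?_eq_some hpre
        rw [List.mem_range'_1] at hmem'
        omega
      | none =>
        have := List.find?_eq_none.mp hpre j2 (by rw [List.mem_range'_1]; omega)
        simpa using this
  · rintro ⟨hij, hjm, hle, hfirst⟩
    unfold pvNgeB
    rw [pv_range_split i jj m (by omega) (by omega), List.find?_append]
    have hnone : (List.range' (i+1) (jj - (i+1))).find?
        (fun j => decide (h.getD i 0 ≤ h.getD j 0)) = none := by
      rw [List.find?_eq_none]
      intro x hx
      rw [List.mem_range'_1] at hx
      simp only [decide_eq_true_eq, not_le]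
      exact hfirst x (by omega) (by omega)
    rw [hnone]
    have hsucc : m - jj = (m - (jj+1)) + 1 := by omega
    rw [hsucc, List.range'_succ, List.find?_cons_of_pos (by simpa using hle)]
    rfl

theorem pvNgeB_cases (h : List Int) (i m : Nat) :
    pvNgeB h i m = -1 ∨ ∃ jj : Nat, pvNgeB h i m = (jj : Int) := by
  unfold pvNgeB
  cases hf : (List.range' (i+1) (m - (i+1))).find? (fun j => decide (h.getD i 0 ≤ h.getD j 0)) with
  | none => left; rfl
  | some j => right; exact ⟨j, rfl⟩

----------------------------------------------------------------------
-- records / skyline lemmas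
----------------------------------------------------------------------

theorem pvSkyline (x : Int) (a : List Int) : ∀ (b : List Int), (∀ y ∈ a, y < x) →
    (pvRecords (a ++ b)).dropWhile (· < x) = (pvRecords b).dropWhile (· < x) := by
  induction a with
  | nil => intro b _; rfl
  | cons z t ih =>
    intro b hall
    have hz : z < x := hall z List.mem_cons_self
    show (pvRecords (z :: (t ++ b))).dropWhile (· < x) = _
    rw [pvRecords, List.dropWhile_cons]
    simp only [hz, decide_true, if_true]
    rw [pv_dropWhile_dropWhile z x (le_of_lt hz)]
    exact ih b (fun y hy => hall y (List.mem_cons_of_mem z hy))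

theorem pvRecords_drop_succ (h : List Int) (i : Nat) (hi : i < h.length) :
    pvRecords (h.drop i) = h.getD i 0 :: (pvRecords (h.drop (i+1))).dropWhile (· < h.getD i 0) := by
  rw [List.drop_eq_getElem_cons hi, pvRecords, List.getD_eq_getElem h 0 hi]

-- all elements of drop (i+1) are values h[j] with i < j < length
theorem pv_mem_drop (h : List Int) (i : Nat) (y : Int) (hy : y ∈ h.drop (i+1)) :
    ∃ j : Nat, i < j ∧ j < h.length ∧ y = h.getD j 0 := by
  obtain ⟨t, ht, hval⟩ := List.mem_iff_getElem.mp hy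
  have hlen : t < h.length - (i+1) := by simpa using ht
  refine ⟨i + 1 + t, by omega, by omega, ?_⟩
  rw [List.getElem_drop] at hval
  rw [List.getD_eq_getElem h 0 (by omega)]
  exact hval.symm

-- skyline after i when nothing to the right is ≥ h[i]
theorem pvS1 (h : List Int) (i : Nat)
    (hall : ∀ j, i < j → j < h.length → h.getD j 0 < h.getD i 0) :
    (pvRecords (h.drop (i+1))).dropWhile (· < h.getD i 0) = [] := by
  have hall' : ∀ y ∈ h.drop (i+1), y < h.getD i 0 := by
    intro y hy
    obtain ⟨j, hij, hjl, hval⟩ := pv_mem_drop h i y hy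
    rw [hval]; exact hall j hij hjl
  have hs := pvSkyline (h.getD i 0) (h.drop (i+1)) [] hall'
  rw [List.append_nil] at hs
  rw [hs]
  rfl

-- skyline after i when the first ≥ element is at jj
theorem pvS2 (h : List Int) (i jj : Nat) (hij : i < jj) (hjl : jj < h.length)
    (hle : h.getD i 0 ≤ h.getD jj 0)
    (hfirst : ∀ j, i < j → j < jj → h.getD j 0 < h.getD i 0) :
    (pvRecords (h.drop (i+1))).dropWhile (· < h.getD i 0) = pvRecords (h.drop jj) := by
  have hdecomp : h.drop (i+1) = (h.drop (i+1)).take (jj - (i+1)) ++ h.drop jj := by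
    conv_lhs => rw [← List.take_append_drop (jj - (i+1)) (h.drop (i+1))]
    rw [List.drop_drop]
    congr 2
    omega
  rw [hdecomp, pvSkyline (h.getD i 0) ((h.drop (i+1)).take (jj - (i+1))) (h.drop jj)]
  · rw [pvRecords_drop_succ h jj hjl, List.dropWhile_cons]
    rw [if_neg (by simpa using not_lt.mpr hle)]
  · intro y hy
    obtain ⟨t, ht, hval⟩ := List.mem_iff_getElem.mp hy
    have ht' : t < jj - (i+1) := by
      have := ht
      simp at this
      omega
    rw [List.getElem_take, List.getElem_drop] at hval
    have : y = h.getD (i+1+t) 0 := by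
      rw [List.getD_eq_getElem h 0 (by
        have := ht; simp at this; omega)]
      exact hval.symm
    rw [this]
    exact hfirst (i+1+t) (by omega) (by omega)

theorem pvRiSpec_last (h : List Int) (hne : h ≠ []) : pvRiSpec h (h.length - 1) = 1 := by
  unfold pvRiSpec
  have hl : 0 < h.length := List.length_pos_iff.mpr hne
  rw [pvRecords_drop_succ h (h.length - 1) (by omega)]
  have : h.length - 1 + 1 = h.length := by omega
  rw [this, List.drop_length]
  simp [pvRecords]

theorem pvSpec_length (h : List Int) : (pvSpec h).length = h.length := by
  induction h with
  | nil => rfl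
  | cons x t ih => simp [pvSpec, ih]

theorem pvSpec_getD (h : List Int) : ∀ (j : Nat), j < h.length →
    (pvSpec h).getD j 0 = pvAnsSpec h j := by
  induction h with
  | nil => intro j hj; simp at hj
  | cons x t ih =>
    intro j hj
    cases j with
    | zero => simp [pvSpec, pvAnsSpec]
    | succ jn =>
      simp only [pvSpec, List.getD_cons_succ]
      rw [ih jn (by simpa using hj)]
      simp [pvAnsSpec]

----------------------------------------------------------------------
-- B equals the specification
----------------------------------------------------------------------

theorem pvPop2_spec (x : Int) : ∀ (s : List Int) (c : Int),
    pvPop2 x s c = (s.dropWhile (· < x), c + ((s.takeWhile (· < x)).length : Int)) := by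
  intro s
  induction s with
  | nil => intro c; simp [pvPop2]
  | cons t rest ih =>
    intro c
    by_cases htx : t < x
    · simp only [pvPop2, htx, if_true]
      rw [ih (c+1), List.dropWhile_cons_of_pos (by simpa using htx),
        List.takeWhile_cons_of_pos (by simpa using htx)]
      rw [Prod.mk.injEq]
      refine ⟨rfl, ?_⟩
      rw [List.length_cons]
      push_cast
      ring
    · simp only [pvPop2, htx, if_false]
      rw [List.dropWhile_cons_of_neg (by simpa using htx),
        List.takeWhile_cons_of_neg (by simpa using htx)]
      simp

theorem pvB_fold (h : List Int) :
    h.reverse.foldl pvStepB ([], []) = (pvRecords h, (pvSpec h).reverse) := by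
  induction h with
  | nil => simp [pvRecords, pvSpec]
  | cons x t ih =>
    rw [List.reverse_cons, List.foldl_append, ih]
    simp only [List.foldl_cons, List.foldl_nil]
    show pvStepB (pvRecords t, (pvSpec t).reverse) x = _
    unfold pvStepB
    rw [pvPop2_spec]
    simp only []
    rw [Prod.mk.injEq]
    constructor
    · rfl
    · show (pvSpec t).reverse ++ [_] = (pvSpec (x :: t)).reverse
      rw [pvSpec, List.reverse_cons]
      congr 1
      unfold pvCnt
      by_cases hd : (pvRecords t).dropWhile (· < x) = []
      · simp [hd]
      · simp only [hd, if_false, ne_eq, not_false_eq_true, if_true]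
        ring

theorem pvB_eq_spec (h : List Int) : canSeePersonsCount_alt h = pvSpec h := by
  unfold canSeePersonsCount_alt
  rw [pvB_fold]
  simp

----------------------------------------------------------------------
-- A: first loop
----------------------------------------------------------------------

theorem pvPop1_spec (h : List Int) (i : Int) : ∀ (s r : List Int),
    (∀ j ∈ s, 0 ≤ j ∧ j < (r.length : Int)) →
    (pvPop1 h i s r).1 = s.dropWhile (fun j => PySem.List.pyGetD h j 0 ≤ PySem.List.pyGetD h i 0) ∧
    (pvPop1 h i s r).2.length = r.length ∧
    (∀ mn : Nat, PySem.List.pyGetD (pvPop1 h i s r).2 (mn : Int) 0 =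
      if (mn : Int) ∈ s.takeWhile (fun j => PySem.List.pyGetD h j 0 ≤ PySem.List.pyGetD h i 0)
      then i else PySem.List.pyGetD r (mn : Int) 0) := by
  intro s
  induction s with
  | nil =>
    intro r _
    refine ⟨rfl, rfl, ?_⟩
    intro mn
    simp [pvPop1]
  | cons j rest ih =>
    intro r hval
    obtain ⟨hj0, hjlen⟩ := hval j List.mem_cons_self
    by_cases hc : PySem.List.pyGetD h j 0 ≤ PySem.List.pyGetD h i 0
    · have hstep : pvPop1 h i (j :: rest) r = pvPop1 h i rest (PySem.List.pySetD r j i) := by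
        simp [pvPop1, hc]
      have hlen' : (PySem.List.pySetD r j i).length = r.length :=
        PySem.List.length_pySetD r j i
      have hval' : ∀ x ∈ rest, 0 ≤ x ∧ x < ((PySem.List.pySetD r j i).length : Int) := by
        intro x hx
        rw [hlen']
        exact hval x (List.mem_cons_of_mem j hx)
      obtain ⟨ih1, ih2, ih3⟩ := ih (PySem.List.pySetD r j i) hval'
      refine ⟨?_, ?_, ?_⟩
      · rw [hstep, ih1, List.dropWhile_cons]
        simp [hc]
      · rw [hstep, ih2, hlen']
      · intro mn
        rw [hstep, ih3 mn]
        rw [List.takeWhile_cons_of_pos (by simpa using hc)]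
        have hjnat : j = ((j.toNat : Nat) : Int) := (Int.toNat_of_nonneg hj0).symm
        by_cases hmem : (mn : Int) ∈ List.takeWhile
            (fun j => decide (PySem.List.pyGetD h j 0 ≤ PySem.List.pyGetD h i 0)) rest
        · rw [if_pos hmem, if_pos (List.mem_cons_of_mem j hmem)]
        · rw [if_neg hmem]
          rw [hjnat, PySem.List.pyGetD_pySetD_natCast r j.toNat mn i 0 (by omega)]
          by_cases hmj : mn = j.toNat
          · rw [if_pos hmj, if_pos (by rw [List.mem_cons]; left; omega)]
          · rw [if_neg hmj]
            have hne1 : ¬ ((mn : Int) = ((j.toNat : Nat) : Int)) := by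
              intro hcc; exact hmj (by exact_mod_cast hcc)
            rw [if_neg (by rw [List.mem_cons]; push_neg; exact ⟨hne1, hmem⟩)]
    · have hstep : pvPop1 h i (j :: rest) r = (j :: rest, r) := by
        simp [pvPop1, hc]
      refine ⟨?_, ?_, ?_⟩
      · rw [hstep, List.dropWhile_cons_of_neg (by simpa using hc)]
      · rw [hstep]
      · intro mn
        rw [hstep, List.takeWhile_cons_of_neg (by simpa using hc)]
        simp

theorem pvStep1_spec (h : List Int) (k : Nat) (hk : k < h.length) (p : List Int × List Int)
    (hp : pvInv1 h k p) : pvInv1 h (k+1) (pvStep1 h p (k : Int)) := by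
  obtain ⟨hmem, hexact, hpair, hlen, hval⟩ := hp
  -- heights strictly increase towards the bottom of the stack
  have hmono : p.1.Pairwise (fun a b => PySem.List.pyGetD h a 0 < PySem.List.pyGetD h b 0) := by
    refine hpair.imp_of_mem ?_
    intro a b ha hb hab
    obtain ⟨an, rfl, hak, _⟩ := hmem a ha
    obtain ⟨bn, rfl, hbk, hbn⟩ := hmem b hb
    have h1 := (pvNgeB_neg_iff h bn k).mp hbn an (by omega) hak
    rw [PySem.List.pyGetD_natCast, PySem.List.pyGetD_natCast]
    exact h1
  have hvalid : ∀ j ∈ p.1, 0 ≤ j ∧ j < (p.2.length : Int) := by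
    intro j hj
    obtain ⟨jn, rfl, hjk, _⟩ := hmem j hj
    constructor
    · omega
    · rw [hlen]; omega
  obtain ⟨hq1, hq2, hq3⟩ := pvPop1_spec h (k : Int) p.1 p.2 hvalid
  set cond := fun j => decide (PySem.List.pyGetD h j 0 ≤ PySem.List.pyGetD h (k : Int) 0) with hcond
  -- every element of the remaining stack fails cond
  have hdrop : ∀ j ∈ p.1.dropWhile cond,
      PySem.List.pyGetD h (k : Int) 0 < PySem.List.pyGetD h j 0 := by
    intro j hj
    cases hd : p.1.dropWhile cond with
    | nil => rw [hd] at hj; simp at hj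
    | cons dh dt =>
      have hhead : cond dh = false := by
        have := List.head?_dropWhile_not cond p.1
        rw [hd] at this
        simpa using this
      have hhead' : PySem.List.pyGetD h (k : Int) 0 < PySem.List.pyGetD h dh 0 := by
        simp only [hcond, decide_eq_false_iff_not, not_le] at hhead
        exact hhead
      rw [hd] at hj
      rcases List.mem_cons.mp hj with rfl | hjt
      · exact hhead'
      · have hsub : (p.1.dropWhile cond).Sublist p.1 := List.dropWhile_sublist cond
        have hpd : (p.1.dropWhile cond).Pairwise
            (fun a b => PySem.List.pyGetD h a 0 < PySem.List.pyGetD h b 0) :=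
          hmono.sublist hsub
        rw [hd] at hpd
        have := (List.pairwise_cons.mp hpd).1 j hjt
        omega
  have hdropmem : ∀ j ∈ p.1.dropWhile cond, j ∈ p.1 :=
    fun j hj => (List.dropWhile_sublist cond).subset hj
  constructor
  · -- membership
    intro j hj
    simp only [pvStep1, hq1] at hj
    rcases List.mem_cons.mp hj with rfl | hjd
    · exact ⟨k, rfl, by omega, pvNgeB_trivial h k (k+1) (by omega)⟩
    · obtain ⟨jn, rfl, hjk, hjn⟩ := hmem _ (hdropmem _ hjd)
      refine ⟨jn, rfl, by omega, ?_⟩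
      rw [pvNgeB_neg_iff]
      intro j2 h1 h2
      by_cases hj2 : j2 = k
      · subst hj2
        have := hdrop _ hjd
        rw [PySem.List.pyGetD_natCast, PySem.List.pyGetD_natCast] at this
        exact this
      · exact (pvNgeB_neg_iff h jn k).mp hjn j2 h1 (by omega)
  refine ⟨?_, ?_, ?_, ?_⟩
  · -- exactness
    intro jn hjn hneg
    simp only [pvStep1, hq1]
    by_cases hjk : jn = k
    · subst hjk; exact List.mem_cons_self
    · have hjk' : jn < k := by omega
      have hnegk : pvNgeB h jn k = -1 := by
        rw [pvNgeB_neg_iff]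
        intro j2 h1 h2
        exact (pvNgeB_neg_iff h jn (k+1)).mp hneg j2 h1 (by omega)
      have hins : (jn : Int) ∈ p.1 := hexact jn hjk' hnegk
      have hcondf : ¬ (cond (jn : Int) = true) := by
        have := (pvNgeB_neg_iff h jn (k+1)).mp hneg k hjk' (by omega)
        simp only [hcond, decide_eq_true_eq, not_le, PySem.List.pyGetD_natCast]
        simpa using this
      have : (jn : Int) ∈ p.1.takeWhile cond ∨ (jn : Int) ∈ p.1.dropWhile cond := by
        rw [← List.mem_append, List.takeWhile_append_dropWhile]
        exact hins
      rcases this with htk | hdk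
      · exact absurd (List.mem_takeWhile_imp htk) hcondf
      · exact List.mem_cons_of_mem _ hdk
  · -- pairwise >
    simp only [pvStep1, hq1]
    rw [List.pairwise_cons]
    constructor
    · intro j hj
      obtain ⟨jn, rfl, hjk, _⟩ := hmem _ (hdropmem _ hj)
      omega
    · exact hpair.sublist (List.dropWhile_sublist cond)
  · -- length
    simp only [pvStep1]
    rw [hq2, hlen]
  · -- rrh values
    intro mn hmn
    simp only [pvStep1]
    rw [hq3 mn]
    by_cases htk : (mn : Int) ∈ p.1.takeWhile cond
    · -- popped: gets k
      have hmem' : (mn : Int) ∈ p.1 := (List.takeWhile_sublist cond).subset htk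
      obtain ⟨jn, hjn_eq, hjk, hjn⟩ := hmem _ hmem'
      have hmnjn : mn = jn := by omega
      subst hmnjn
      have hcondt := List.mem_takeWhile_imp htk
      simp only [hcond, decide_eq_true_eq, PySem.List.pyGetD_natCast] at hcondt
      rw [if_pos htk]
      have hgoal : pvNgeB h mn (k+1) = ((k : Nat) : Int) := by
        rw [pvNgeB_eq_coe_iff]
        exact ⟨by omega, by omega, hcondt,
          fun j2 h1 h2 => (pvNgeB_neg_iff h mn k).mp hjn j2 h1 (by omega)⟩
      rw [hgoal]
    · simp only [htk, if_false]
      rw [hval mn hmn]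
      rcases pvNgeB_cases h mn k with hneg | ⟨jj, hjj⟩
      · rw [hneg]
        by_cases hmk : mn < k
        · have hins : (mn : Int) ∈ p.1 := hexact mn hmk hneg
          have : (mn : Int) ∈ p.1.dropWhile cond := by
            have : (mn : Int) ∈ p.1.takeWhile cond ∨ (mn : Int) ∈ p.1.dropWhile cond := by
              rw [← List.mem_append, List.takeWhile_append_dropWhile]
              exact hins
            tauto
          have hgt := hdrop _ this
          rw [PySem.List.pyGetD_natCast, PySem.List.pyGetD_natCast] at hgt
          symm
          rw [pvNgeB_neg_iff]
          intro j2 h1 h2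
          by_cases hj2 : j2 = k
          · subst hj2; exact hgt
          · exact (pvNgeB_neg_iff h mn k).mp hneg j2 h1 (by omega)
        · symm
          exact pvNgeB_trivial h mn (k+1) (by omega)
      · rw [hjj]
        obtain ⟨h1, h2, h3, h4⟩ := (pvNgeB_eq_coe_iff h mn k jj).mp hjj
        exact ((pvNgeB_eq_coe_iff h mn (k+1) jj).mpr ⟨h1, by omega, h3, h4⟩).symm

theorem pvLoop1_inv (h : List Int) : ∀ (k : Nat), k ≤ h.length →
    pvInv1 h k ((PySem.List.pyRange 0 (k : Int) 1).foldl (pvStep1 h)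
      ([], List.replicate h.length (-1))) := by
  intro k
  induction k with
  | zero =>
    intro _
    rw [PySem.List.pyRange_one_eq_nil (by norm_num)]
    refine ⟨by simp, by simp, by simp, by simp, ?_⟩
    intro jn hjn
    rw [pvNgeB_trivial h jn 0 (by omega), PySem.List.pyGetD_natCast]
    simp [List.getD, List.getElem?_replicate, hjn]
  | succ k ih =>
    intro hk
    have hcast : ((k+1 : Nat) : Int) = (k : Int) + 1 := by push_cast; ring
    rw [hcast, PySem.List.pyRange_one_succ_right (by positivity), List.foldl_append]
    simp only [List.foldl_cons, List.foldl_nil]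
    exact pvStep1_spec h k (by omega) _ (ih (by omega))

----------------------------------------------------------------------
-- A: second loop
----------------------------------------------------------------------

theorem pvStep2_spec (h rrh : List Int) (hnd : h.Nodup)
    (hrr : ∀ jn : Nat, jn < h.length → PySem.List.pyGetD rrh (jn : Int) 0 = pvNgeB h jn h.length)
    (i : Nat) (hi : i < h.length) (ri : List Int) (hlen : ri.length = h.length)
    (hri : ∀ jn : Nat, jn < h.length →
      PySem.List.pyGetD ri (jn : Int) 0 = if i < jn then pvRiSpec h jn else 1) :
    (pvStep2 h rrh ri (i : Int)).length = h.length ∧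
    (∀ jn : Nat, jn < h.length →
      PySem.List.pyGetD (pvStep2 h rrh ri (i : Int)) (jn : Int) 0 =
        if i ≤ jn then pvRiSpec h jn else 1) := by
  have hr := hrr i hi
  rcases pvNgeB_cases h i h.length with hneg | ⟨jj, hjj⟩
  · -- no next-greater-or-equal: untouched, and pvRiSpec h i = 1
    have hstep : pvStep2 h rrh ri (i : Int) = ri := by
      unfold pvStep2
      rw [hr, hneg]
      norm_num
    have hspec1 : pvRiSpec h i = 1 := by
      unfold pvRiSpec
      rw [pvRecords_drop_succ h i hi, pvS1 h i ((pvNgeB_neg_iff h i h.length).mp hneg)]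
      simp
    rw [hstep]
    refine ⟨hlen, ?_⟩
    intro jn hjn
    rw [hri jn hjn]
    by_cases h1 : i < jn
    · simp [h1, le_of_lt h1]
    · by_cases h2 : i = jn
      · subst h2; simp [hspec1]
      · have : ¬ (i ≤ jn) := by omega
        simp [h1, this]
  · -- next ≥ at jj; by Nodup it is strictly greater
    obtain ⟨hij, hjl, hle, hfirst⟩ := (pvNgeB_eq_coe_iff h i h.length jj).mp hjj
    have hne : h.getD i 0 ≠ h.getD jj 0 := by
      rw [List.getD_eq_getElem h 0 hi, List.getD_eq_getElem h 0 hjl]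
      intro hcontra
      have := (List.Nodup.getElem_inj_iff hnd).mp hcontra
      omega
    have hlt : h.getD i 0 < h.getD jj 0 := lt_of_le_of_ne hle hne
    have hguard : (0:Int) < (jj : Int) ∧
        PySem.List.pyGetD h ((jj : Nat) : Int) 0 > PySem.List.pyGetD h (i : Int) 0 := by
      constructor
      · omega
      · rw [PySem.List.pyGetD_natCast, PySem.List.pyGetD_natCast]
        simpa using hlt
    have hstep : pvStep2 h rrh ri (i : Int) =
        PySem.List.pySetD ri (i : Int) (PySem.List.pyGetD ri ((jj : Nat) : Int) 0 + 1) := by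
      unfold pvStep2
      rw [hr, hjj]
      rw [if_pos hguard]
    have hrecords : pvRecords (h.drop i) = h.getD i 0 :: pvRecords (h.drop jj) := by
      rw [pvRecords_drop_succ h i hi, pvS2 h i jj hij hjl hle hfirst]
    have hspec : pvRiSpec h i = pvRiSpec h jj + 1 := by
      unfold pvRiSpec
      rw [hrecords]
      push_cast [List.length_cons]
      ring
    have hv : PySem.List.pyGetD ri ((jj : Nat) : Int) 0 = pvRiSpec h jj := by
      rw [hri jj hjl, if_pos hij]
    rw [hstep]
    constructor
    · rw [PySem.List.length_pySetD, hlen]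
    · intro jn hjn
      rw [PySem.List.pyGetD_pySetD_natCast ri i jn _ 0 (by omega)]
      by_cases h1 : jn = i
      · subst h1
        rw [if_pos rfl, if_pos (le_refl _), hv, hspec]
      · rw [if_neg h1, hri jn hjn]
        by_cases h2 : i < jn
        · simp [h2, le_of_lt h2]
        · have : ¬ (i ≤ jn) := by omega
          simp [h2, this]

theorem pvLoop2_inv (h rrh : List Int) (hnd : h.Nodup)
    (hrr : ∀ jn : Nat, jn < h.length → PySem.List.pyGetD rrh (jn : Int) 0 = pvNgeB h jn h.length) :
    ∀ (m : Nat), m < h.length → ∀ (ri : List Int), ri.length = h.length →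
    (∀ jn : Nat, jn < h.length →
      PySem.List.pyGetD ri (jn : Int) 0 = if m < jn then pvRiSpec h jn else 1) →
    ((PySem.List.pyRange (m : Int) (-1) (-1)).foldl (pvStep2 h rrh) ri).length = h.length ∧
    (∀ jn : Nat, jn < h.length →
      PySem.List.pyGetD ((PySem.List.pyRange (m : Int) (-1) (-1)).foldl (pvStep2 h rrh) ri)
        (jn : Int) 0 = pvRiSpec h jn) := by
  intro m
  induction m with
  | zero =>
    intro hm ri hlen hri
    rw [PySem.List.pyRange_neg_one_cons (by norm_num)]
    have hnil : PySem.List.pyRange ((0:Nat) - 1) (-1) (-1) = [] := by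
      rw [PySem.List.pyRange_neg_one_eq_nil (by norm_num)]
    rw [hnil]
    simp only [List.foldl_cons, List.foldl_nil]
    obtain ⟨hl, hv⟩ := pvStep2_spec h rrh hnd hrr 0 hm ri hlen hri
    exact ⟨hl, fun jn hjn => by
      have := hv jn hjn
      rw [if_pos (Nat.zero_le jn)] at this
      exact_mod_cast this⟩
  | succ m ih =>
    intro hm ri hlen hri
    have hcast : ((m+1 : Nat) : Int) = (m : Int) + 1 := by push_cast; ring
    rw [hcast, PySem.List.pyRange_neg_one_cons (by omega)]
    simp only [List.foldl_cons]
    have harg : (m : Int) + 1 - 1 = (m : Int) := by ring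
    rw [harg]
    obtain ⟨hl, hv⟩ := pvStep2_spec h rrh hnd hrr (m+1) hm ri hlen
      (by
        intro jn hjn
        rw [hri jn hjn])
    have hv' : ∀ jn : Nat, jn < h.length →
        PySem.List.pyGetD (pvStep2 h rrh ri ((m+1 : Nat) : Int)) (jn : Int) 0 =
          if m < jn then pvRiSpec h jn else 1 := by
      intro jn hjn
      rw [hv jn hjn]
      by_cases hc : m < jn
      · rw [if_pos hc, if_pos (by omega)]
      · rw [if_neg hc, if_neg (by omega)]
    have := ih (by omega) (pvStep2 h rrh ri ((m+1 : Nat) : Int)) hl hv'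
    rw [hcast] at this
    exact this

----------------------------------------------------------------------
-- A: third loop
----------------------------------------------------------------------

theorem pvStep3_spec (h rrh ri : List Int) (hn2 : 2 ≤ h.length)
    (hrr : ∀ jn : Nat, jn < h.length → PySem.List.pyGetD rrh (jn : Int) 0 = pvNgeB h jn h.length)
    (hlri : ri.length = h.length)
    (hri : ∀ jn : Nat, jn < h.length → PySem.List.pyGetD ri (jn : Int) 0 = pvRiSpec h jn)
    (i : Nat) (hi : i + 1 < h.length) (ans : List Int) (hla : ans.length = h.length) :
    (pvStep3 rrh ri ans (i : Int)).length = h.length ∧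
    (∀ jn : Nat, jn < h.length →
      PySem.List.pyGetD (pvStep3 rrh ri ans (i : Int)) (jn : Int) 0 =
        if jn = i then pvAnsSpec h i else PySem.List.pyGetD ans (jn : Int) 0) := by
  have hrine : ri ≠ [] := by
    intro hcon
    rw [hcon] at hlri
    simp at hlri
    omega
  have hi1 : PySem.List.pyGetD ri ((i : Int) + 1) 0 = pvRiSpec h (i+1) := by
    have : (i : Int) + 1 = ((i+1 : Nat) : Int) := by push_cast; ring
    rw [this, hri (i+1) (by omega)]
  have hval : PySem.List.pyGetD ri ((i : Int) + 1) 0 -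
      PySem.List.pyGetD ri (PySem.List.pyGetD rrh (i : Int) 0) 0 + 1 = pvAnsSpec h i := by
    rw [hi1, hrr i (by omega)]
    have htotal : pvRiSpec h (i+1) =
        (((pvRecords (h.drop (i+1))).takeWhile (· < h.getD i 0)).length : Int) +
        (((pvRecords (h.drop (i+1))).dropWhile (· < h.getD i 0)).length : Int) := by
      unfold pvRiSpec
      rw [pv_len_take_drop (fun y => decide (y < h.getD i 0)) (pvRecords (h.drop (i+1)))]
      push_cast
      ring
    rcases pvNgeB_cases h i h.length with hneg | ⟨jj, hjj⟩
    · rw [hneg]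
      have hlast : PySem.List.pyGetD ri (-1) 0 = 1 := by
        rw [PySem.List.pyGetD_neg_one ri 0 hrine, List.getLast_eq_getElem]
        have : ri[ri.length - 1] = PySem.List.pyGetD ri ((ri.length - 1 : Nat) : Int) 0 := by
          rw [PySem.List.pyGetD_natCast, List.getD_eq_getElem ri 0 (by omega)]
        rw [this, hlri, hri (h.length - 1) (by omega), pvRiSpec_last h (by
          intro hcon
          rw [hcon] at hn2
          simp at hn2)]
      rw [hlast]
      have hdropnil := pvS1 h i ((pvNgeB_neg_iff h i h.length).mp hneg)
      unfold pvAnsSpec pvCnt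
      rw [hdropnil, htotal, hdropnil]
      simp
    · obtain ⟨hij, hjl, hle, hfirst⟩ := (pvNgeB_eq_coe_iff h i h.length jj).mp hjj
      rw [hjj, hri jj hjl]
      have hdropeq := pvS2 h i jj hij hjl hle hfirst
      have hdropne : (pvRecords (h.drop (i+1))).dropWhile (· < h.getD i 0) ≠ [] := by
        rw [hdropeq, pvRecords_drop_succ h jj hjl]
        simp
      unfold pvAnsSpec pvCnt
      rw [if_neg hdropne, htotal, hdropeq]
      unfold pvRiSpec
      ring
  constructor
  · unfold pvStep3
    rw [PySem.List.length_pySetD, hla]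
  · intro jn hjn
    unfold pvStep3
    simp only
    rw [PySem.List.pyGetD_pySetD_natCast ans i jn _ 0 (by omega), hval]

theorem pvLoop3_inv (h rrh ri : List Int) (hn2 : 2 ≤ h.length)
    (hrr : ∀ jn : Nat, jn < h.length → PySem.List.pyGetD rrh (jn : Int) 0 = pvNgeB h jn h.length)
    (hlri : ri.length = h.length)
    (hri : ∀ jn : Nat, jn < h.length → PySem.List.pyGetD ri (jn : Int) 0 = pvRiSpec h jn) :
    ∀ (k : Nat), k + 1 ≤ h.length →
    ((PySem.List.pyRange 0 (k : Int) 1).foldl (pvStep3 rrh ri)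
      (List.replicate h.length 0)).length = h.length ∧
    (∀ jn : Nat, jn < h.length →
      PySem.List.pyGetD ((PySem.List.pyRange 0 (k : Int) 1).foldl (pvStep3 rrh ri)
        (List.replicate h.length 0)) (jn : Int) 0 =
        if jn < k then pvAnsSpec h jn else 0) := by
  intro k
  induction k with
  | zero =>
    intro _
    rw [PySem.List.pyRange_one_eq_nil (by norm_num)]
    simp only [List.foldl_nil]
    refine ⟨by simp, ?_⟩
    intro jn hjn
    rw [PySem.List.pyGetD_natCast]
    simp [List.getD, List.getElem?_replicate, hjn]
  | succ k ih =>
    intro hk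
    have hcast : ((k+1 : Nat) : Int) = (k : Int) + 1 := by push_cast; ring
    rw [hcast, PySem.List.pyRange_one_succ_right (by positivity), List.foldl_append]
    simp only [List.foldl_cons, List.foldl_nil]
    obtain ⟨ih1, ih2⟩ := ih (by omega)
    obtain ⟨hs1, hs2⟩ := pvStep3_spec h rrh ri hn2 hrr hlri hri k (by omega) _ ih1
    refine ⟨hs1, ?_⟩
    intro jn hjn
    rw [hs2 jn hjn]
    by_cases h1 : jn = k
    · subst h1
      simp
    · rw [if_neg h1, ih2 jn hjn]
      by_cases h2 : jn < k
      · rw [if_pos h2, if_pos (by omega)]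
      · rw [if_neg h2, if_neg (by omega)]

----------------------------------------------------------------------
-- A equals the specification
----------------------------------------------------------------------

theorem pvAnsSpec_last (h : List Int) (hne : h ≠ []) : pvAnsSpec h (h.length - 1) = 0 := by
  unfold pvAnsSpec pvCnt
  have hl : 0 < h.length := List.length_pos_iff.mpr hne
  have h1 : h.length - 1 + 1 = h.length := by omega
  rw [h1, List.drop_length]
  simp [pvRecords]

theorem pvA_eq_spec (h : List Int) (hnd : h.Nodup) : canSeePersonsCount h = pvSpec h := by
  by_cases hne : h = []
  · subst hne; rfl
  have hn1 : 0 < h.length := List.length_pos_iff.mpr hne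
  obtain ⟨-, -, -, hlR, hvR⟩ := pvLoop1_inv h h.length le_rfl
  set R : List Int := ((PySem.List.pyRange 0 ((h.length : Int)) 1).foldl (pvStep1 h)
      ([], List.replicate h.length (-1))).2 with hRdef
  set RI : List Int := (PySem.List.pyRange ((h.length : Int) - 2) (-1) (-1)).foldl
      (pvStep2 h R) (List.replicate h.length 1) with hRIdef
  have hreplget : ∀ (v : Int) (jn : Nat), jn < h.length →
      PySem.List.pyGetD (List.replicate h.length v) (jn : Int) 0 = v := by
    intro v jn hjn
    rw [PySem.List.pyGetD_natCast]
    simp [List.getD, hjn]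
  have hRI : RI.length = h.length ∧
      (∀ jn : Nat, jn < h.length → PySem.List.pyGetD RI (jn : Int) 0 = pvRiSpec h jn) := by
    by_cases hn2 : 2 ≤ h.length
    · have hcast : ((h.length : Int) - 2) = (((h.length - 2 : Nat)) : Int) := by push_cast; omega
      rw [hRIdef, hcast]
      exact pvLoop2_inv h R hnd hvR (h.length - 2) (by omega) _ (by simp)
        (by
          intro jn hjn
          rw [hreplget 1 jn hjn]
          by_cases hcc : h.length - 2 < jn
          · rw [if_pos hcc]
            have hjn' : jn = h.length - 1 := by omega
            rw [hjn', pvRiSpec_last h hne]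
          · rw [if_neg hcc])
    · have hl1 : h.length = 1 := by omega
      have hnil : PySem.List.pyRange ((h.length : Int) - 2) (-1) (-1) = [] := by
        rw [hl1]
        rw [PySem.List.pyRange_neg_one_eq_nil (by norm_num)]
      rw [hRIdef, hnil]
      simp only [List.foldl_nil]
      refine ⟨by simp, ?_⟩
      intro jn hjn
      have hjn0 : jn = 0 := by omega
      rw [hreplget 1 jn hjn, hjn0]
      have h0 : (0 : Nat) = h.length - 1 := by omega
      rw [h0, pvRiSpec_last h hne]
  obtain ⟨hlRI, hvRI⟩ := hRI
  have hANS : ((PySem.List.pyRange 0 ((h.length : Int) - 1) 1).foldl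
        (pvStep3 R RI) (List.replicate h.length 0)).length = h.length ∧
      (∀ jn : Nat, jn < h.length →
        PySem.List.pyGetD ((PySem.List.pyRange 0 ((h.length : Int) - 1) 1).foldl
          (pvStep3 R RI) (List.replicate h.length 0)) (jn : Int) 0 =
          if jn < h.length - 1 then pvAnsSpec h jn else 0) := by
    by_cases hn2 : 2 ≤ h.length
    · have hcast : ((h.length : Int) - 1) = (((h.length - 1 : Nat)) : Int) := by push_cast; omega
      rw [hcast]
      exact pvLoop3_inv h R RI hn2 hvR hlRI hvRI (h.length - 1) (by omega)
    · have hl1 : h.length = 1 := by omega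
      have hnil : PySem.List.pyRange 0 ((h.length : Int) - 1) 1 = [] := by
        rw [hl1]
        rw [PySem.List.pyRange_one_eq_nil (by norm_num)]
      rw [hnil]
      simp only [List.foldl_nil]
      refine ⟨by simp, ?_⟩
      intro jn hjn
      have hjn0 : jn = 0 := by omega
      rw [hreplget 0 jn hjn, hjn0, hl1]
      norm_num
  obtain ⟨hlA, hvA⟩ := hANS
  show (PySem.List.pyRange 0 ((h.length : Int) - 1) 1).foldl
      (pvStep3 R RI) (List.replicate h.length 0) = pvSpec h
  apply List.ext_getElem
  · rw [hlA, pvSpec_length]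
  · intro i h1 h2
    have hi : i < h.length := by rw [hlA] at h1; exact h1
    have hL : ((PySem.List.pyRange 0 ((h.length : Int) - 1) 1).foldl
        (pvStep3 R RI) (List.replicate h.length 0))[i] =
        PySem.List.pyGetD ((PySem.List.pyRange 0 ((h.length : Int) - 1) 1).foldl
          (pvStep3 R RI) (List.replicate h.length 0)) (i : Int) 0 := by
      rw [PySem.List.pyGetD_natCast, List.getD_eq_getElem _ 0 h1]
    have hRgt : (pvSpec h)[i] = (pvSpec h).getD i 0 := by
      rw [List.getD_eq_getElem _ 0 h2]
    rw [hL, hRgt, hvA i hi, pvSpec_getD h i hi]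
    by_cases hc : i < h.length - 1
    · rw [if_pos hc]
    · rw [if_neg hc]
      have hieq : i = h.length - 1 := by omega
      rw [hieq, pvAnsSpec_last h hne]

-- ===== VERDICT (by name: the statement is the Claim_ definition above) =====
theorem canSeePersonsCount_spec : Claim_equal_canSeePersonsCount := by
  intro h _ hnd
  unfold Spec_canSeePersonsCount
  rw [pvA_eq_spec h hnd, pvB_eq_spec h]
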